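-- pv_equiv track=rewrite | github.com/younusimran/Practice | findwords.py | order_result
-- ===== SOURCE A (Python) =====
-- def order_result(str1, str2, c_check):
--     results={}
--     location = 0
--     if all(value == True for value in c_check.values()):
--         for char in str1:
--             try:
--                 if str2.index(char, location) >= location:
--                     results[char] = True
--                     location = (str2.index(char, location)) + 1
--                 else:
--                     results[char] = False
--             except:
--                 results[char] = False
--         if all(value == True for value in results.values()):
--             results = "The letter in words in order in sentence"
--         else:
--             results = "The letter in words are not in order, in sentence"
--     else:
--         results= "The sentence do not contain letter(s) or contain less than required"
--     return results
-- ===== SOURCE B (Python) =====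
-- def order_result(str1, str2, c_check):
--     if not all(c_check.values()):
--         return "The sentence do not contain letter(s) or contain less than required"
--     positions = {}
--     for i, ch in enumerate(str2):
--         positions.setdefault(ch, []).append(i)
--     loc = 0
--     for ch in str1:
--         lst = positions.get(ch, [])
--         lo, hi = 0, len(lst)
--         while lo < hi:
--             mid = (lo + hi) // 2
--             if lst[mid] < loc:
--                 lo = mid + 1
--             else:
--                 hi = mid
--         if lo == len(lst):
--             return "The letter in words are not in order, in sentence"
--         loc = lst[lo] + 1
--     return "The letter in words in order in sentence"
-- ===== Notes on version B (the rewrite author's own statement) =====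
-- stated objective: alternative
-- what changed: Replaces A's per-character str.index rescans and results-dict bookkeeping with a char->occurrence-positions index built in one pass over str2, then a hand-written binary search per character of str1 for the first occurrence at or after the current location, with an early return on failure.
import Mathlib
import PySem

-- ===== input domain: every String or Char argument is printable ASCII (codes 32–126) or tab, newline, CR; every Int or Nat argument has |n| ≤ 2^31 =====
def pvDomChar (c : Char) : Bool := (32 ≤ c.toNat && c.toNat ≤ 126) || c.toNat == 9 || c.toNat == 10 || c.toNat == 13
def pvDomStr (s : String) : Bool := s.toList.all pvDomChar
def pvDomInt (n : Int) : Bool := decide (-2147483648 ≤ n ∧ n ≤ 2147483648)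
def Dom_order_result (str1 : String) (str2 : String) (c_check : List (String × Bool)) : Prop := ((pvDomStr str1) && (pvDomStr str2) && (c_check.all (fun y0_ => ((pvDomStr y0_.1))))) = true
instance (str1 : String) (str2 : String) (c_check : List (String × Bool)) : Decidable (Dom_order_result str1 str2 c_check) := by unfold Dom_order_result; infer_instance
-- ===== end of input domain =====

-- B replaces A's repeated str.index scans with a char→occurrence-positions index
-- built in one pass over str2 plus a binary search per character of str1
-- (objective: alternative algorithm, not claimed faster).

-- ===== PORT A =====
-- the 'for char in str1' loop: str2.index(char, location) raises ValueError exactly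
-- when PySem.Str.findFrom returns -1 (the 'except' branch); otherwise the index value
-- is findFrom's value and the 'if … >= location' comparison is made on it.
def orLoopA (str2 : String) : List Char → Int → PySem.Dict String Bool → PySem.Dict String Bool
  | [], _, res => res
  | c :: cs, loc, res =>
      let i := PySem.Str.findFrom str2 (String.ofList [c]) loc
      if i = -1 then orLoopA str2 cs loc (res.insert (String.ofList [c]) false)       -- except: results[char] = False
      else if loc ≤ i then orLoopA str2 cs (i + 1) (res.insert (String.ofList [c]) true)
      else orLoopA str2 cs loc (res.insert (String.ofList [c]) false)

def order_result (str1 : String) (str2 : String) (c_check : List (String × Bool)) : String :=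
  if (PySem.Dict.ofList c_check).values.all (fun v => v == true) then
    let results := orLoopA str2 str1.toList 0 PySem.Dict.empty
    if results.values.all (fun v => v == true) then
      "The letter in words in order in sentence"
    else
      "The letter in words are not in order, in sentence"
  else
    "The sentence do not contain letter(s) or contain less than required"

-- ===== PORT B =====
-- 'for i, ch in enumerate(str2): positions.setdefault(ch, []).append(i)'
-- (the in-place append is d[ch] = d.get(ch, []) ++ [i], i.e. Dict.modify)
def buildPos (l : List Char) : PySem.Dict Char (List Int) :=
  (PySem.List.enumerate l).foldl (fun d p => d.modify p.2 [] (· ++ [p.1])) PySem.Dict.empty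

-- the hand-written 'while lo < hi' binary search of Source B, step for step
def bsearch (lst : List Int) (loc : Int) (lo hi : Nat) : Nat :=
  if lo < hi then
    let mid := (lo + hi) / 2
    if lst.getD mid 0 < loc then bsearch lst loc (mid + 1) hi
    else bsearch lst loc lo mid
  else lo
termination_by hi - lo
decreasing_by all_goals omega

-- the 'for ch in str1' loop with its early returns
def loopB (pos : PySem.Dict Char (List Int)) : List Char → Int → String
  | [], _ => "The letter in words in order in sentence"
  | c :: cs, loc =>
      let lst := pos.getD c []
      let lo := bsearch lst loc 0 lst.length
      if lo = lst.length then "The letter in words are not in order, in sentence"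
      else loopB pos cs (lst.getD lo 0 + 1)

def order_result_alt (str1 : String) (str2 : String) (c_check : List (String × Bool)) : String :=
  if !((PySem.Dict.ofList c_check).values.all (fun v => v)) then
    "The sentence do not contain letter(s) or contain less than required"
  else
    loopB (buildPos str2.toList) str1.toList 0

-- ===== PRECONDITION & SPEC =====
def Spec_order_result (str1 : String) (str2 : String) (c_check : List (String × Bool)) (out : String) : Prop := out = order_result_alt str1 str2 c_check
instance (str1 : String) (str2 : String) (c_check : List (String × Bool)) (out : String) : Decidable (Spec_order_result str1 str2 c_check out) := by unfold Spec_order_result; infer_instance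

-- ===== CLAIM (what is proved, stated in full; the proofs are below) =====
def Claim_equal_order_result : Prop := ∀ (str1 : String) (str2 : String) (c_check : List (String × Bool)), Dom_order_result str1 str2 c_check → Spec_order_result str1 str2 c_check (order_result str1 str2 c_check)

-- ===== LEMMAS AND PROOFS =====

-- the mathematical yardstick both programs are reduced to: greedy subsequence test
def isSubseq : List Char → List Char → Bool
  | [], _ => true
  | _ :: _, [] => false
  | c :: cs, d :: ds => if c = d then isSubseq cs ds else isSubseq (c :: cs) ds

-- inserting a False value makes the dict's values not all True
lemma allTrue_insert_false (d : PySem.Dict String Bool) (k : String) :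
    ((d.insert k false).values.all (fun v => v == true)) = false := by
  unfold PySem.Dict.insert
  split
  · rename_i h
    unfold PySem.Dict.contains at h
    simp only [List.any_eq_true, beq_iff_eq] at h
    obtain ⟨p, hp, hk⟩ := h
    simp only [PySem.Dict.values, List.all_eq_false, List.mem_map]
    refine ⟨false, ⟨(k, false), ⟨p, hp, by simp [hk]⟩, rfl⟩, by simp⟩
  · simp [PySem.Dict.values]

-- inserting True for a key that is not mapped to False leaves "all values True" unchanged
lemma allTrue_insert_true (d : PySem.Dict String Bool) (k : String)
    (h : (k, false) ∉ d.items) :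
    ((d.insert k true).values.all (fun v => v == true)) = (d.values.all (fun v => v == true)) := by
  unfold PySem.Dict.insert
  split
  · simp only [PySem.Dict.values, List.map_map]
    apply Bool.eq_iff_iff.mpr
    simp only [List.all_eq_true, List.mem_map, Function.comp]
    constructor
    · rintro hall v ⟨p, hp, rfl⟩
      by_cases hk : p.1 = k
      · rcases p with ⟨k', v⟩
        cases v
        · exact absurd (show (k, false) ∈ d.items by simpa [← hk] using hp) h
        · rfl
      · have := hall _ ⟨p, hp, rfl⟩
        simpa [hk] using this
    · rintro hall v ⟨p, hp, rfl⟩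
      have := hall _ ⟨p, hp, rfl⟩
      by_cases hk : p.1 = k <;> simp [hk, this]
  · simp [PySem.Dict.values, List.all_append]

-- a False entry survives an insert of True
lemma mem_false_insert_true (d : PySem.Dict String Bool) (k k' : String)
    (h : (k', false) ∈ (d.insert k true).items) : (k', false) ∈ d.items := by
  unfold PySem.Dict.insert at h
  split at h
  · simp only [List.mem_map] at h
    obtain ⟨p, hp, he⟩ := h
    by_cases hk : p.1 = k
    · simp [hk] at he
    · simpa [hk, ← he] using hp
  · simp only [List.mem_append, List.mem_singleton] at h
    rcases h with h | h
    · exact h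
    · simp at h

-- a False entry after inserting False: the inserted key or an old False entry
lemma mem_false_insert_false (d : PySem.Dict String Bool) (k k' : String)
    (h : (k', false) ∈ (d.insert k false).items) : k' = k ∨ (k', false) ∈ d.items := by
  unfold PySem.Dict.insert at h
  split at h
  · simp only [List.mem_map] at h
    obtain ⟨p, hp, he⟩ := h
    by_cases hk : p.1 = k
    · simp [hk] at he
      exact Or.inl he.symm
    · exact Or.inr (by simpa [hk, ← he] using hp)
  · simp only [List.mem_append, List.mem_singleton] at h
    rcases h with h | h
    · exact Or.inr h
    · simp at h
      exact Or.inl h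

-- [c] is a prefix of l iff l starts with c
lemma singleton_prefix_iff (c : Char) (l : List Char) : [c] <+: l ↔ ∃ l', l = c :: l' := by
  simp [List.cons_prefix_iff]

-- if c does not occur in t, no subsequence starting with c is in t
lemma isSubseq_not_mem (c : Char) (cs t : List Char) (h : c ∉ t) :
    isSubseq (c :: cs) t = false := by
  induction t with
  | nil => rfl
  | cons d ds ih =>
      have hcd : ¬ c = d := by intro he; exact h (he ▸ List.mem_cons_self)
      simp only [isSubseq, if_neg hcd]
      exact ih (fun hm => h (List.mem_cons_of_mem _ hm))

-- greedy step: matching c at its first occurrence n keeps the subsequence answer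
lemma isSubseq_skip (c : Char) (cs : List Char) :
    ∀ (t : List Char) (n : Nat), [c] <+: t.drop n → (∀ i < n, ¬ [c] <+: t.drop i) →
      isSubseq (c :: cs) t = isSubseq cs (t.drop (n + 1)) := by
  intro t
  induction t with
  | nil =>
      intro n h1 _
      rw [List.drop_nil] at h1
      rcases (singleton_prefix_iff c []).mp h1 with ⟨l', hl⟩
      simp at hl
  | cons d ds ih =>
      intro n h1 h2
      cases n with
      | zero =>
          rcases (singleton_prefix_iff c _).mp h1 with ⟨l', hl⟩
          simp only [List.drop_zero] at hl
          injection hl with hd ht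
          subst hd
          simp [isSubseq]
      | succ m =>
          have hdc : ¬ c = d := by
            intro he
            exact h2 0 (Nat.succ_pos m) ((singleton_prefix_iff c _).mpr ⟨ds, by rw [he]; rfl⟩)
          simp only [isSubseq, if_neg hdc]
          have := ih m (by simpa using h1) (fun i hi => by simpa using h2 (i + 1) (by omega))
          simpa using this

-- main A-loop invariant: A's dict is all-True iff the greedy subsequence scan succeeds
lemma loopA_allTrue (str2 : String) :
    ∀ (cs : List Char) (k : Nat) (res : PySem.Dict String Bool),
      k ≤ str2.toList.length →
      (∀ c : Char, (String.ofList [c], false) ∈ res.items → c ∉ str2.toList.drop k) →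
      ((orLoopA str2 cs (↑k) res).values.all (fun v => v == true))
        = (res.values.all (fun v => v == true) && isSubseq cs (str2.toList.drop k)) := by
  intro cs
  induction cs with
  | nil => intro k res _ _; simp [orLoopA, isSubseq]
  | cons c cs ih =>
      intro k res hk hinv
      have hsub : (String.ofList [c]).toList = [c] := by simp
      have hff := PySem.Chars.findFrom_natCast str2.toList [c] k hk
      by_cases hfind : PySem.Chars.find (str2.toList.drop k) [c] = -1
      · -- char not found: except branch, results[char] = False
        have hi : PySem.Str.findFrom str2 (String.ofList [c]) (↑k) = -1 := by
          rw [PySem.Str.findFrom_eq, hsub, hff, if_pos hfind]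
        have hcmem : c ∉ str2.toList.drop k := by
          intro hm
          exact (PySem.Chars.find_eq_neg_one_iff _ _).mp hfind
            ((List.singleton_infix_iff c _).mpr hm)
        rw [show orLoopA str2 (c :: cs) (↑k) res
              = orLoopA str2 cs (↑k) (res.insert (String.ofList [c]) false) by
            simp only [orLoopA, hi]; rfl]
        rw [ih k _ hk ?_]
        · rw [allTrue_insert_false, isSubseq_not_mem c cs _ hcmem]
          simp
        · intro c' hc'
          rcases mem_false_insert_false _ _ _ hc' with he | hm
          · have hce : c' = c := by
              have := congrArg String.toList he
              simpa using this
            exact hce ▸ hcmem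
          · exact hinv c' hm
      · -- char found at first index j of the suffix
        have h0 : 0 ≤ PySem.Chars.find (str2.toList.drop k) [c] := by
          have := PySem.Chars.neg_one_le_find (str2.toList.drop k) [c]
          omega
        set j := (PySem.Chars.find (str2.toList.drop k) [c]).toNat with hj
        have hjval : PySem.Chars.find (str2.toList.drop k) [c] = (j : Int) := by
          simp [hj, Int.toNat_of_nonneg h0]
        have hspec := PySem.Chars.find_spec (s := str2.toList.drop k) (sub := [c]) h0
        have hpre : [c] <+: (str2.toList.drop k).drop j := hspec.1
        have hmin : ∀ i < j, ¬ [c] <+: (str2.toList.drop k).drop i := hspec.2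
        have hi : PySem.Str.findFrom str2 (String.ofList [c]) (↑k) = ((k + j : Nat) : Int) := by
          rw [PySem.Str.findFrom_eq, hsub, hff, if_neg hfind, hjval]
          push_cast; ring
        have hne : ((k + j : Nat) : Int) ≠ -1 := by omega
        have hle : (↑k : Int) ≤ ((k + j : Nat) : Int) := by push_cast; omega
        rw [show orLoopA str2 (c :: cs) (↑k) res
              = orLoopA str2 cs (((k + j : Nat) : Int) + 1) (res.insert (String.ofList [c]) true) by
            simp only [orLoopA, hi]
            rw [if_neg hne, if_pos hle]]
        -- the drop (k+j) suffix starts with c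
        rcases (singleton_prefix_iff c _).mp (by simpa [List.drop_drop] using hpre) with ⟨l', hl⟩
        have hcmem : c ∈ str2.toList.drop k := by
          have : c ∈ (str2.toList.drop k).drop j := by
            rw [List.drop_drop, hl]; exact List.mem_cons_self
          exact List.mem_of_mem_drop this
        have hklen : k + j + 1 ≤ str2.toList.length := by
          have := congrArg List.length hl
          simp only [List.length_drop, List.length_cons] at this
          omega
        have hcast : (((k + j : Nat) : Int) + 1) = ((k + j + 1 : Nat) : Int) := by push_cast; ring
        rw [hcast, ih (k + j + 1) _ hklen ?_]
        · -- res has no False entry for [c], so inserting True keeps allTrue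
          have hnf : (String.ofList [c], false) ∉ res.items := by
            intro hm
            exact hinv c hm hcmem
          have hidx : k + (j + 1) = k + j + 1 := by omega
          rw [allTrue_insert_true _ _ hnf,
              isSubseq_skip c cs (str2.toList.drop k) j hpre hmin,
              List.drop_drop, hidx]
        · intro c' hc'
          have hold := hinv c' (mem_false_insert_true _ _ _ hc')
          intro hm
          apply hold
          have : str2.toList.drop (k + j + 1) = (str2.toList.drop k).drop (j + 1) := by
            rw [List.drop_drop, show k + (j + 1) = k + j + 1 from by omega]
          rw [this] at hm
          exact List.mem_of_mem_drop hm

-- the A loop started as A starts it: empty dict, location 0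
lemma loopA_main (str1 str2 : String) :
    ((orLoopA str2 str1.toList 0 PySem.Dict.empty).values.all (fun v => v == true))
      = isSubseq str1.toList str2.toList := by
  have hmain := loopA_allTrue str2 str1.toList 0 PySem.Dict.empty
    (Nat.zero_le _) (by intro c hm; simp [PySem.Dict.empty] at hm)
  rw [show ((0:Nat):Int) = (0:Int) by rfl] at hmain
  rw [hmain]
  simp [PySem.Dict.empty, PySem.Dict.values]

-- B-side: the positions list for c is the (increasing) list of indices of c in l
lemma buildPos_getD (l : List Char) (c : Char) :
    (buildPos l).getD c []
      = ((PySem.List.enumerate l).filter (fun p => p.2 == c)).map (·.1) := by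
  unfold buildPos
  rw [show (PySem.List.enumerate l).foldl (fun d p => d.modify p.2 [] (· ++ [p.1])) PySem.Dict.empty
        = ((PySem.List.enumerate l).map (fun p => (p.2, p.1))).foldl
            (fun d p => d.modify p.1 [] (· ++ [p.2])) PySem.Dict.empty by
      rw [List.foldl_map]]
  rw [PySem.Dict.getD_foldl_modify_append]
  rw [show (PySem.Dict.empty : PySem.Dict Char (List Int)).getD c [] = [] from rfl]
  rw [List.filter_map, List.map_map]
  simp [Function.comp_def]

lemma mem_posList (l : List Char) (c : Char) (i : Int) :
    i ∈ (buildPos l).getD c [] ↔ ∃ (k : Nat), ∃ (hk : k < l.length), i = (k : Int) ∧ l[k] = c := by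
  rw [buildPos_getD]
  simp only [List.mem_map, List.mem_filter, PySem.List.mem_enumerate_iff]
  constructor
  · rintro ⟨p, ⟨⟨k, hk, rfl⟩, hc⟩, rfl⟩
    exact ⟨k, hk, by simp, by simpa using hc⟩
  · rintro ⟨k, hk, rfl, hc⟩
    exact ⟨((k : Int), l[k]), ⟨⟨k, hk, by simp⟩, by simpa using hc⟩, rfl⟩

lemma posList_sorted (l : List Char) (c : Char) :
    ((buildPos l).getD c []).Pairwise (· < ·) := by
  rw [buildPos_getD]
  exact List.Pairwise.map _ (fun _ _ h => h)
    ((PySem.List.pairwise_lt_enumerate l 0).filter _)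

-- binary search: the returned index splits the (sorted) list at loc
lemma bsearch_spec (lst : List Int) (loc : Int)
    (hmono : ∀ i j (hi : i < lst.length) (hj : j < lst.length), i < j → lst[i] < lst[j]) :
    ∀ (n lo hi : Nat), hi - lo ≤ n → lo ≤ hi → hi ≤ lst.length →
      (∀ i (h : i < lst.length), i < lo → lst[i] < loc) →
      (∀ i (h : i < lst.length), hi ≤ i → loc ≤ lst[i]) →
      bsearch lst loc lo hi ≤ lst.length ∧
      (∀ i (h : i < lst.length), i < bsearch lst loc lo hi → lst[i] < loc) ∧
      (∀ i (h : i < lst.length), bsearch lst loc lo hi ≤ i → loc ≤ lst[i]) := by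
  intro n
  induction n with
  | zero =>
      intro lo hi hn hle hlen hlo hhi
      have he : lo = hi := by omega
      rw [bsearch, if_neg (by omega)]
      exact ⟨by omega, fun i h hi' => hlo i h hi', fun i h hi' => hhi i h (by omega)⟩
  | succ m ih =>
      intro lo hi hn hle hlen hlo hhi
      by_cases hlt : lo < hi
      · rw [bsearch, if_pos hlt]
        have hmid : (lo + hi) / 2 < lst.length := by omega
        have hgd : lst.getD ((lo + hi) / 2) 0 = lst[(lo + hi) / 2] := List.getD_eq_getElem _ _ hmid
        simp only [hgd]
        split
        · rename_i hcase
          refine ih ((lo + hi) / 2 + 1) hi (by omega) (by omega) hlen ?_ hhi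
          intro i h hi'
          rcases Nat.lt_or_ge i ((lo + hi) / 2) with h' | h'
          · exact lt_trans (hmono i ((lo + hi) / 2) h hmid h') hcase
          · have : i = (lo + hi) / 2 := by omega
            subst this; exact hcase
        · rename_i hcase
          have hcase : loc ≤ lst[(lo + hi) / 2] := not_lt.mp hcase
          refine ih lo ((lo + hi) / 2) (by omega) (by omega) (by omega) hlo ?_
          intro i h hi'
          rcases Nat.lt_or_ge ((lo + hi) / 2) i with h' | h'
          · exact le_of_lt (lt_of_le_of_lt hcase (hmono _ i hmid h h'))
          · have : i = (lo + hi) / 2 := by omega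
            subst this; exact hcase
      · rw [bsearch, if_neg hlt]
        have he : lo = hi := by omega
        exact ⟨by omega, fun i h hi' => hlo i h hi', fun i h hi' => hhi i h (by omega)⟩

-- main B-loop lemma: loopB computes the greedy subsequence answer
lemma loopB_eq (l : List Char) :
    ∀ (cs : List Char) (k : Nat),
      loopB (buildPos l) cs ((k : Nat) : Int)
        = (if isSubseq cs (l.drop k) then "The letter in words in order in sentence"
           else "The letter in words are not in order, in sentence") := by
  intro cs
  induction cs with
  | nil => intro k; simp [loopB, isSubseq]
  | cons c cs ih =>
      intro k
      set lst := (buildPos l).getD c [] with hlst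
      have hsorted := posList_sorted l c
      have hmono : ∀ i j (hi : i < lst.length) (hj : j < lst.length), i < j → lst[i] < lst[j] := by
        intro i j hi hj hij
        exact List.pairwise_iff_getElem.mp hsorted i j hi hj hij
      have hmono_le : ∀ i j (hi : i < lst.length) (hj : j < lst.length), i ≤ j → lst[i] ≤ lst[j] := by
        intro i j hi hj hij
        rcases Nat.eq_or_lt_of_le hij with he | hlt
        · subst he; exact le_refl _
        · exact le_of_lt (hmono i j hi hj hlt)
      have hspec := bsearch_spec lst ((k : Nat) : Int) hmono lst.length 0 lst.length
        (by omega) (Nat.zero_le _) (le_refl _)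
        (by intro i h hi'; omega) (by intro i h hi'; omega)
      set r := bsearch lst ((k : Nat) : Int) 0 lst.length with hr
      obtain ⟨hrlen, hbefore, hafter⟩ := hspec
      by_cases hcase : r = lst.length
      · -- every occurrence of c is < k: c ∉ l.drop k
        have hcmem : c ∉ l.drop k := by
          intro hm
          obtain ⟨j, hj, hje⟩ := List.mem_iff_getElem.mp hm
          have hlen : k + j < l.length := by
            simp only [List.length_drop] at hj; omega
          have hidx : l[k + j]'hlen = c := by simpa using hje
          have hmem : ((k + j : Nat) : Int) ∈ (buildPos l).getD c [] := by
            rw [mem_posList]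
            exact ⟨k + j, hlen, rfl, hidx⟩
          rw [← hlst] at hmem
          obtain ⟨q, hq, hqe⟩ := List.mem_iff_getElem.mp hmem
          have := hbefore q hq (by omega)
          rw [hqe] at this
          omega
        rw [show loopB (buildPos l) (c :: cs) ((k : Nat) : Int)
              = "The letter in words are not in order, in sentence" by
            simp only [loopB, ← hlst, ← hr]
            rw [if_pos hcase]]
        rw [isSubseq_not_mem c cs _ hcmem]
        simp
      · -- lst[r] is the first occurrence of c at index ≥ k
        have hrlt : r < lst.length := by omega
        have hmem : lst[r] ∈ (buildPos l).getD c [] := by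
          rw [← hlst]; exact List.getElem_mem hrlt
        obtain ⟨pn, hpn, hpe, hpc⟩ := (mem_posList l c lst[r]).mp hmem
        have hkp : (k : Int) ≤ lst[r] := hafter r hrlt (le_refl r)
        have hkpn : k ≤ pn := by rw [hpe] at hkp; exact_mod_cast hkp
        -- minimality: no occurrence of c at an index in [k, pn)
        have hminocc : ∀ q (hq3 : q < l.length), k ≤ q → q < pn → l[q]'hq3 ≠ c := by
          intro q hq3 hq1 hq2 hqc
          have hmemq : ((q : Nat) : Int) ∈ (buildPos l).getD c [] := by
            rw [mem_posList]; exact ⟨q, hq3, rfl, hqc⟩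
          rw [← hlst] at hmemq
          obtain ⟨t, ht, hte⟩ := List.mem_iff_getElem.mp hmemq
          rcases Nat.lt_or_ge t r with h' | h'
          · have := hbefore t ht h'
            rw [hte] at this
            omega
          · have hge : lst[r] ≤ lst[t] := hmono_le r t hrlt ht h'
            rw [hte, hpe] at hge
            have : pn ≤ q := by exact_mod_cast hge
            omega
        -- the skip lemma hypotheses on t = l.drop k, n = pn - k
        have hdropeq : (l.drop k).drop (pn - k) = l.drop pn := by
          rw [List.drop_drop]; congr 1; omega
        have hpre : [c] <+: (l.drop k).drop (pn - k) := by
          rw [hdropeq, singleton_prefix_iff]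
          exact ⟨l.drop (pn + 1), by rw [List.drop_eq_getElem_cons hpn, hpc]⟩
        have hmin : ∀ i < pn - k, ¬ [c] <+: (l.drop k).drop i := by
          intro i hi hpre'
          rw [List.drop_drop, singleton_prefix_iff] at hpre'
          obtain ⟨l', hl'⟩ := hpre'
          have hlen' : k + i < l.length := by
            have := congrArg List.length hl'
            simp only [List.length_drop, List.length_cons] at this
            omega
          have : l[k + i]'hlen' = c := by
            have := congrArg (fun t => t[0]?) hl'
            simp only [List.getElem?_drop] at this
            simpa [List.getElem?_eq_getElem hlen'] using this
          exact hminocc (k + i) hlen' (by omega) (by omega) this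
        have hstep : loopB (buildPos l) (c :: cs) ((k : Nat) : Int)
            = loopB (buildPos l) cs (lst[r] + 1) := by
          simp only [loopB, ← hlst, ← hr]
          rw [if_neg hcase, List.getD_eq_getElem _ _ hrlt]
        rw [hstep, hpe,
            show ((pn : Int) + 1) = ((pn + 1 : Nat) : Int) by push_cast; ring,
            ih (pn + 1),
            isSubseq_skip c cs (l.drop k) (pn - k) hpre hmin,
            List.drop_drop,
            show k + (pn - k + 1) = pn + 1 by omega]

-- ===== VERDICT (by name: the statement is the Claim_ definition above) =====
theorem order_result_spec : Claim_equal_order_result := by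
  intro str1 str2 c_check _
  unfold Spec_order_result order_result order_result_alt
  have hcond : ((PySem.Dict.ofList c_check).values.all (fun v => v == true))
      = ((PySem.Dict.ofList c_check).values.all (fun v => v)) := by
    simp
  rw [hcond]
  by_cases h : ((PySem.Dict.ofList c_check).values.all (fun v => v)) = true
  · rw [if_pos h, h]
    simp only [Bool.not_true, Bool.false_eq_true, if_false]
    have hB : loopB (buildPos str2.toList) str1.toList 0
        = (if isSubseq str1.toList str2.toList then "The letter in words in order in sentence"
           else "The letter in words are not in order, in sentence") := by
      have := loopB_eq str2.toList str1.toList 0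
      simpa using this
    rw [hB, ← loopA_main str1 str2]
  · rw [if_neg h]
    have hb : (!(PySem.Dict.ofList c_check).values.all (fun v => v)) = true := by
      simp [Bool.eq_false_iff.mpr h]
    rw [if_pos hb]
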